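-- pv_equiv track=rewrite | github.com/rodinany/ColingPython-p1 | HW2/G/G.py | solution
-- ===== SOURCE A (Python) =====
-- def solution(a, b):
--     c = []
--     d, e = tuple(a[:]), tuple(b[:])
--     while a and b:
--         if a[0] != b[0]:
--             if min(a[0],b[0]) == b[0]:
--                 if b[0] not in d:
--                     c.append(b[0])
--                     del b[0]
--                 else:
--                     del b[0]
--             else:
--                 c.append(a[0])
--                 del a[0]
--         else:
--             c.append(a[0])
--             del a[0]
--             del b[0]
--     x = max(a,b)
--     for i in x:
--         if x == b:
--             if i in e and i not in d:
--                 c.append(i)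
--         else:
--             c.append(i)
--     return c
-- ===== SOURCE B (Python) =====
-- def solution(a, b):
--     da = set(a)
--     c = []
--     i = j = 0
--     n, m = len(a), len(b)
--     while i < n and j < m:
--         x, y = a[i], b[j]
--         if x == y:
--             c.append(x)
--             i += 1
--             j += 1
--         elif y < x:
--             if y not in da:
--                 c.append(y)
--             j += 1
--         else:
--             c.append(x)
--             i += 1
--     c.extend(a[i:])
--     c.extend(y for y in b[j:] if y not in da)
--     return c
-- ===== Notes on version B (the rewrite author's own statement) =====
-- stated objective: faster
-- what changed: Replaced the del-from-front loop with two index pointers and the O(n) tuple-membership scans with one precomputed set, and replaced the lexicographic max(a,b) tail trick with direct extend of the leftover slices (b's leftover filtered by the set).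
import Mathlib
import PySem

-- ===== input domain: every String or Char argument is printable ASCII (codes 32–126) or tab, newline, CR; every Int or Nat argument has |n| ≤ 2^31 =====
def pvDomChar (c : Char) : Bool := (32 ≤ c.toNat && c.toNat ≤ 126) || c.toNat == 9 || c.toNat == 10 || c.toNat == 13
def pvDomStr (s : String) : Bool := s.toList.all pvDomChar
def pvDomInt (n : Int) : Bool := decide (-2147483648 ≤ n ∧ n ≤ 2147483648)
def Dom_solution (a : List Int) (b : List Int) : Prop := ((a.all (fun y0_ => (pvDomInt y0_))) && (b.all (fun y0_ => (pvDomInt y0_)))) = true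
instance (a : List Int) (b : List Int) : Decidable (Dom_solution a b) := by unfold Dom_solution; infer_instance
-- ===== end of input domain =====

-- B replaces A's del-from-front loop + tuple membership + lexicographic max(a,b) tail by
-- index pointers, one precomputed set and direct extension of the leftover slices (faster).
-- A empties one of its argument lists in place; B does not mutate — return values only.

-- ===== PORT A =====
-- Python list '<' (lexicographic), used by max(a, b)
def pyListLt : List Int → List Int → Bool
  | [], [] => false
  | [], _ :: _ => true
  | _ :: _, [] => false
  | x :: xs, y :: ys => if x < y then true else if y < x then false else pyListLt xs ys

-- the while loop: returns (c, leftover a, leftover b)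
def loopA (d : List Int) (c : List Int) : List Int → List Int → List Int × List Int × List Int
  | x :: xs, y :: ys =>
    if x ≠ y then
      if min x y = y then
        if ¬ (y ∈ d) then loopA d (c ++ [y]) (x :: xs) ys
        else loopA d c (x :: xs) ys
      else loopA d (c ++ [x]) xs (y :: ys)
    else loopA d (c ++ [x]) xs ys
  | a, b => (c, a, b)
termination_by a b => a.length + b.length

def solution (a : List Int) (b : List Int) : List Int :=
  let d := a
  let e := b
  let r := loopA d [] a b
  let c := r.1
  let a' := r.2.1
  let b' := r.2.2
  let x := if pyListLt a' b' then b' else a'   -- max(a, b): b only if strictly greater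
  x.foldl (fun c i =>
    if x = b' then (if i ∈ e ∧ ¬ (i ∈ d) then c ++ [i] else c)
    else c ++ [i]) c

-- ===== PORT B =====
-- the while loop over the two suffixes, then c ++ a-rest ++ filtered b-rest
def loopB (da : PySem.Set Int) (c : List Int) : List Int → List Int → List Int
  | x :: xs, y :: ys =>
    if x = y then loopB da (c ++ [x]) xs ys
    else if y < x then
      if ¬ (PySem.Set.contains da y) then loopB da (c ++ [y]) (x :: xs) ys
      else loopB da c (x :: xs) ys
    else loopB da (c ++ [x]) xs (y :: ys)
  | xs, ys => c ++ xs ++ ys.filter (fun y => ¬ (PySem.Set.contains da y))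
termination_by xs ys => xs.length + ys.length

def solution_alt (a : List Int) (b : List Int) : List Int :=
  loopB (PySem.Set.ofList a) [] a b

-- ===== PRECONDITION & SPEC =====
def Spec_solution (a : List Int) (b : List Int) (out : List Int) : Prop := out = solution_alt a b
instance (a : List Int) (b : List Int) (out : List Int) : Decidable (Spec_solution a b out) := by unfold Spec_solution; infer_instance

-- ===== CLAIM (what is proved, stated in full; the proofs are below) =====
def Claim_equal_solution : Prop := ∀ (a : List Int) (b : List Int), Dom_solution a b → Spec_solution a b (solution a b)

-- ===== LEMMAS AND PROOFS =====

-- A's tail phase, as a function of the loop's result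
def tailA (d e : List Int) (r : List Int × List Int × List Int) : List Int :=
  let x := if pyListLt r.2.1 r.2.2 then r.2.2 else r.2.1
  x.foldl (fun c i =>
    if x = r.2.2 then (if i ∈ e ∧ ¬ (i ∈ d) then c ++ [i] else c)
    else c ++ [i]) r.1

theorem contains_ofList (d : List Int) (y : Int) :
    PySem.Set.contains (PySem.Set.ofList d) y = decide (y ∈ d) := by
  by_cases h : y ∈ d
  · simp only [h, decide_true]
    rw [PySem.Set.contains_iff]
    exact (PySem.Set.mem_ofList d y).2 h
  · simp only [h, decide_false]
    rw [Bool.eq_false_iff, Ne, PySem.Set.contains_iff, PySem.Set.mem_ofList]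
    exact h

theorem foldl_append_all (l c : List Int) :
    l.foldl (fun c i => c ++ [i]) c = c ++ l := by
  induction l generalizing c with
  | nil => simp
  | cons x xs ih => simp [List.foldl, ih, List.append_assoc]

theorem main_lemma (d e : List Int) (a b c : List Int) (hb : ∀ y ∈ b, y ∈ e) :
    tailA d e (loopA d c a b) = loopB (PySem.Set.ofList d) c a b := by
  induction c, a, b using loopA.induct d with
  | case1 c x xs y ys hne hmin hnd ih =>
    have hyx : y < x := by
      rcases lt_trichotomy x y with h | h | h
      · rw [min_eq_left h.le] at hmin; exact absurd hmin hne
      · exact absurd h hne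
      · exact h
    rw [loopA, loopB, if_pos hne, if_pos hmin, if_pos hnd, if_neg hne, if_pos hyx,
        contains_ofList, if_pos (by simp [hnd])]
    exact ih (fun z hz => hb z (List.mem_cons_of_mem _ hz))
  | case2 c x xs y ys hne hmin hd ih =>
    have hyx : y < x := by
      rcases lt_trichotomy x y with h | h | h
      · rw [min_eq_left h.le] at hmin; exact absurd hmin hne
      · exact absurd h hne
      · exact h
    have hd' : y ∈ d := by by_contra h; exact hd h
    rw [loopA, loopB, if_pos hne, if_pos hmin, if_neg hd, if_neg hne, if_pos hyx,
        contains_ofList, if_neg (by simp [hd'])]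
    exact ih (fun z hz => hb z (List.mem_cons_of_mem _ hz))
  | case3 c x xs y ys hne hmin ih =>
    have hxy : x < y := by
      rcases lt_trichotomy x y with h | h | h
      · exact h
      · exact absurd h hne
      · rw [min_eq_right h.le] at hmin; exact absurd rfl hmin
    rw [loopA, loopB, if_pos hne, if_neg hmin, if_neg hne, if_neg (by omega : ¬ y < x)]
    exact ih hb
  | case4 c x xs y ys hne ih =>
    have hxy : x = y := by by_contra h; exact hne h
    rw [loopA, loopB, if_neg hne, if_pos hxy]
    exact ih (fun z hz => hb z (List.mem_cons_of_mem _ hz))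
  | case5 c a b hnot =>
    rw [loopA.eq_def, loopB.eq_def]
    match a, b with
    | x :: xs, y :: ys => exact (hnot x xs y ys rfl rfl).elim
    | [], [] => simp [tailA, pyListLt]
    | [], y :: ys =>
      simp only [tailA, pyListLt, if_true]
      rw [PySem.List.foldl_append_ite_eq_filter]
      simp only [List.append_nil]
      congr 1
      exact List.filter_congr (fun i hi => by simp [hb i hi])
    | x :: xs, [] =>
      simp only [tailA, pyListLt]
      simp only [reduceCtorEq, if_false]
      rw [foldl_append_all (x :: xs) c]
      simp

-- ===== VERDICT (by name: the statement is the Claim_ definition above) =====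
theorem solution_spec : Claim_equal_solution := by
  intro a b _
  show solution a b = solution_alt a b
  have h := main_lemma a b a b [] (fun y hy => hy)
  simpa [solution, solution_alt, tailA] using h
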